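-- pv_equiv track=rewrite | github.com/SpectreZ7/Junction-Hackathon | agents/digital_twin_agent.py | _format_hours
-- ===== SOURCE A (Python) =====
-- from typing import Dict, List, Tuple, Optional
--
-- def _format_hours(hours: List[int]) -> str:
--     """Format list of hours into readable time ranges"""
--     if not hours:
--         return "No rides"
--
--     sorted_hours = sorted(hours)
--     ranges = []
--     start = sorted_hours[0]
--     end = start
--
--     for i in range(1, len(sorted_hours)):
--         if sorted_hours[i] == end + 1:
--             end = sorted_hours[i]
--         else:
--             ranges.append(f"{start}:00-{end+1}:00")
--             start = sorted_hours[i]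
--             end = start
--
--     ranges.append(f"{start}:00-{end+1}:00")
--     return ", ".join(ranges)
-- ===== SOURCE B (Python) =====
-- def _format_hours(hours):
--     """Format list of hours into readable time ranges"""
--     if not hours:
--         return "No rides"
--     pairs = _ranges(sorted(hours))
--     return ", ".join(f"{a}:00-{b + 1}:00" for a, b in pairs)
--
--
-- def _ranges(s):
--     """(start, end) pairs of the maximal consecutive runs of a non-empty sorted
--     list, by divide and conquer: solve each half, merge the two halves' pair
--     lists, fusing the boundary pair when the right half continues the left."""
--     if len(s) == 1:
--         return [(s[0], s[0])]
--     m = len(s) // 2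
--     left, right = _ranges(s[:m]), _ranges(s[m:])
--     (a, b), (c, d) = left[-1], right[0]
--     if c == b + 1:
--         return left[:-1] + [(a, d)] + right[1:]
--     return left + right
-- ===== Notes on version B (the rewrite author's own statement) =====
-- stated objective: alternative
-- what changed: Replaces A's single flat loop with start/end accumulator state by divide and conquer: recursively compute the (start, end) run pairs of each half of the sorted list and merge the halves, fusing the boundary pair when the right half continues the left; formatting and joining happen once at the end over the pair list.
import Mathlib
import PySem

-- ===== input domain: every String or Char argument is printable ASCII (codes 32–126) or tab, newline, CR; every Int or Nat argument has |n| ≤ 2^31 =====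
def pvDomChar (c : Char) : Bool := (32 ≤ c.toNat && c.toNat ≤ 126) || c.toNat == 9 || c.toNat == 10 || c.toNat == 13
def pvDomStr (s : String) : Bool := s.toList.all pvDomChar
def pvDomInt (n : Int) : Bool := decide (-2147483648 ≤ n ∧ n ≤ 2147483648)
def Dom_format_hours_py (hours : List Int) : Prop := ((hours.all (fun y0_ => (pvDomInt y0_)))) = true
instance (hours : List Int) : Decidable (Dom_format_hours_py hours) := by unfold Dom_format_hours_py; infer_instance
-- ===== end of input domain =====

-- B replaces A's accumulator loop by divide and conquer on the sorted list: run pairs of each half, merged at the boundary (alternative algorithm, same asymptotic cost).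

-- ===== PORT A =====
-- f"{start}:00-{end+1}:00"
def pvFmt (start e : Int) : String :=
  PySem.Int.toStr start ++ ":00-" ++ PySem.Int.toStr (e + 1) ++ ":00"

-- loop body of A's 'for i in range(1, len(sorted_hours))' on state (ranges, start, end)
def pvStep (st : List String × Int × Int) (x : Int) : List String × Int × Int :=
  if x = st.2.2 + 1 then (st.1, st.2.1, x)
  else (st.1 ++ [pvFmt st.2.1 st.2.2], x, x)

def format_hours_py (hours : List Int) : String :=
  if hours = [] then "No rides"
  else
    let sorted_hours := PySem.List.sorted hours (fun v => v) false
    let start0 := PySem.List.pyGetD sorted_hours 0 0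
    let st := (PySem.List.pyRange 1 (sorted_hours.length : Int) 1).foldl
      (fun st i => pvStep st (PySem.List.pyGetD sorted_hours i 0)) ([], start0, start0)
    PySem.Str.join ", " (st.1 ++ [pvFmt st.2.1 st.2.2])

-- ===== PORT B =====
-- _ranges: divide and conquer; the [] branch is a totality guard only (never called on [])
def pvRanges : List Int → List (Int × Int)
  | [] => []
  | x :: xs =>
    if _h1 : (x :: xs).length = 1 then
      [(PySem.List.pyGetD (x :: xs) 0 0, PySem.List.pyGetD (x :: xs) 0 0)]
    else
      -- m = len(s) // 2 : the length is a Nat, so Nat division is Python's floor division here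
      let m := (x :: xs).length / 2
      let left := pvRanges (PySem.List.slice (x :: xs) none (some (m : Int)))
      let right := pvRanges (PySem.List.slice (x :: xs) (some (m : Int)) none)
      let ab := PySem.List.pyGetD left (-1) (0, 0)
      let cd := PySem.List.pyGetD right 0 (0, 0)
      if cd.1 = ab.2 + 1 then
        PySem.List.slice left none (some (-1)) ++ [(ab.1, cd.2)] ++ PySem.List.slice right (some 1) none
      else left ++ right
termination_by s => s.length
decreasing_by
  · rw [PySem.List.slice_to_natCast]
    simp only [List.length_take, List.length_cons] at _h1 ⊢
    omega
  · rw [PySem.List.slice_from_natCast]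
    simp only [List.length_drop, List.length_cons] at _h1 ⊢
    omega

def format_hours_py_alt (hours : List Int) : String :=
  if hours = [] then "No rides"
  else
    PySem.Str.join ", "
      ((pvRanges (PySem.List.sorted hours (fun v => v) false)).map
        (fun p => PySem.Int.toStr p.1 ++ ":00-" ++ PySem.Int.toStr (p.2 + 1) ++ ":00"))

-- ===== PRECONDITION & SPEC =====
def Spec_format_hours_py (hours : List Int) (out : String) : Prop := out = format_hours_py_alt hours
instance (hours : List Int) (out : String) : Decidable (Spec_format_hours_py hours out) := by unfold Spec_format_hours_py; infer_instance

-- ===== CLAIM (what is proved, stated in full; the proofs are below) =====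
def Claim_equal_format_hours_py : Prop := ∀ (hours : List Int), Dom_format_hours_py hours → Spec_format_hours_py hours (format_hours_py hours)

-- ===== LEMMAS AND PROOFS =====

-- canonical run decomposition: list of (start, end) pairs of the maximal consecutive runs
def pvCollect (start e : Int) : List Int → List (Int × Int)
  | [] => [(start, e)]
  | y :: ys => if y = e + 1 then pvCollect start y ys else (start, e) :: pvCollect y y ys

-- length of the consecutive extension of e at the head of the list
def pvRunLen : Int → List Int → Nat
  | _, [] => 0
  | e, y :: ys => if y = e + 1 then 1 + pvRunLen y ys else 0

-- last element of that run
def pvEndOf : Int → List Int → Int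
  | e, [] => e
  | e, y :: ys => if y = e + 1 then pvEndOf y ys else e

-- A's fold produces exactly the formatted pvCollect pairs
lemma pvFoldA (ys : List Int) : ∀ (acc : List String) (start e : Int),
    (ys.foldl pvStep (acc, start, e)).1
      ++ [pvFmt (ys.foldl pvStep (acc, start, e)).2.1 (ys.foldl pvStep (acc, start, e)).2.2]
    = acc ++ (pvCollect start e ys).map (fun p => pvFmt p.1 p.2) := by
  induction ys with
  | nil => intro acc start e; simp [pvCollect]
  | cons y ys ih =>
    intro acc start e
    simp only [List.foldl_cons, pvCollect]
    by_cases h : y = e + 1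
    · rw [show pvStep (acc, start, e) y = (acc, start, y) by simp [pvStep, h], if_pos h]
      subst h
      exact ih acc start (e + 1)
    · rw [show pvStep (acc, start, e) y = (acc ++ [pvFmt start e], y, y) by simp [pvStep, h],
        if_neg h]
      simpa [List.append_assoc] using ih (acc ++ [pvFmt start e]) y y

lemma pvCollect_ne_nil (start e : Int) (xs : List Int) : pvCollect start e xs ≠ [] := by
  induction xs generalizing start e with
  | nil => simp [pvCollect]
  | cons y ys ih =>
    simp only [pvCollect]
    split
    · exact ih _ _
    · simp

-- the first pair of pvCollect starts at the start argument; the rest ignores it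
lemma pvFirst (ys : List Int) : ∀ e a a' : Int,
    ∃ d t, pvCollect a e ys = (a, d) :: t ∧ pvCollect a' e ys = (a', d) :: t := by
  induction ys with
  | nil => intro e a a'; exact ⟨e, [], rfl, rfl⟩
  | cons y ys ih =>
    intro e a a'
    by_cases hc : y = e + 1
    · simpa [pvCollect, hc] using ih y a a'
    · exact ⟨e, pvCollect y y ys, by simp [pvCollect, hc], by simp [pvCollect, hc]⟩

-- splitting the input: the runs of xs ++ y :: ys are the runs of the halves,
-- with the boundary pair fused exactly when y continues the last run of xs
lemma pvSplit (xs : List Int) : ∀ (start e y : Int) (ys : List Int) (P : List (Int × Int)) (a b : Int),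
    pvCollect start e xs = P ++ [(a, b)] →
    pvCollect start e (xs ++ y :: ys) =
      if y = b + 1 then
        P ++ [(a, ((pvCollect y y ys).headD (0, 0)).2)] ++ (pvCollect y y ys).tail
      else (P ++ [(a, b)]) ++ pvCollect y y ys := by
  induction xs with
  | nil =>
    intro start e y ys P a b h
    simp only [pvCollect] at h
    obtain ⟨hP, ha, hb⟩ : P = [] ∧ start = a ∧ e = b := by
      cases P with
      | nil => simp at h; exact ⟨rfl, h.1, h.2⟩
      | cons p ps =>
        exfalso
        have hl := congrArg List.length h
        simp at hl
    subst hP; subst ha; subst hb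
    simp only [List.nil_append]
    by_cases hc : y = e + 1
    · obtain ⟨d, t', h1, h2⟩ := pvFirst ys y start y
      rw [pvCollect, if_pos hc, if_pos hc, h1, h2]
      simp
    · rw [pvCollect, if_neg hc, if_neg hc]
      simp
  | cons z zs ih =>
    intro start e y ys P a b h
    by_cases hc : z = e + 1
    · rw [show ((z :: zs) ++ y :: ys) = z :: (zs ++ y :: ys) from rfl]
      rw [pvCollect, if_pos hc] at h ⊢
      exact ih start z y ys P a b h
    · rw [pvCollect, if_neg hc] at h
      obtain ⟨P', hP⟩ : ∃ P', P = (start, e) :: P' := by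
        cases P with
        | nil =>
          exfalso
          have hl := congrArg List.length h
          simp at hl
          exact pvCollect_ne_nil z z zs hl
        | cons p ps =>
          refine ⟨ps, ?_⟩
          have hh := congrArg (fun l => l.headD ((0 : Int), (0 : Int))) h
          simp at hh
          rw [hh]
      subst hP
      have h' : pvCollect z z zs = P' ++ [(a, b)] := by simpa using h
      rw [show ((z :: zs) ++ y :: ys) = z :: (zs ++ y :: ys) from rfl,
        pvCollect, if_neg hc, ih z z y ys P' a b h']
      split <;> simp

-- B's divide and conquer computes exactly the run decomposition
lemma pvRanges_eq (n : Nat) : ∀ (x : Int) (xs : List Int), (x :: xs).length = n →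
    pvRanges (x :: xs) = pvCollect x x xs := by
  induction n using Nat.strong_induction_on with
  | _ n ih =>
    intro x xs hL
    rw [pvRanges]
    by_cases h1 : (x :: xs).length = 1
    · have hxs : xs = [] := by simpa using h1
      subst hxs
      simp [pvCollect, PySem.List.pyGetD_zero_cons]
    · rw [dif_neg h1]
      have hlen2 : 2 ≤ (x :: xs).length := by
        have hone : 1 ≤ (x :: xs).length := by simp
        omega
      set m := (x :: xs).length / 2 with hm
      simp only [List.length_cons] at hm hlen2
      have hm1 : 1 ≤ m := by omega
      have hmlt : m < (x :: xs).length := by omega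
      have htake : PySem.List.slice (x :: xs) none (some (m : Int)) = x :: xs.take (m - 1) := by
        rw [PySem.List.slice_to_natCast]
        conv_lhs => rw [show m = (m - 1) + 1 by omega]
        rw [List.take_succ_cons]
      have hdroplen : 0 < (xs.drop (m - 1)).length := by
        rw [List.length_drop]
        simp only [List.length_cons] at hmlt
        omega
      simp only [List.length_cons] at hmlt
      obtain ⟨y, ys, hd⟩ := List.exists_cons_of_ne_nil (List.ne_nil_of_length_pos hdroplen)
      have hdrop : PySem.List.slice (x :: xs) (some (m : Int)) none = y :: ys := by
        rw [PySem.List.slice_from_natCast]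
        conv_lhs => rw [show m = (m - 1) + 1 by omega]
        rw [List.drop_succ_cons, hd]
      have hsplit : xs = xs.take (m - 1) ++ y :: ys := by
        rw [← hd, List.take_append_drop]
      have hLlen : (x :: xs.take (m - 1)).length < n := by
        simp only [List.length_cons, List.length_take] at hL ⊢
        omega
      have hys : xs.length - (m - 1) = ys.length + 1 := by
        have hc := congrArg List.length hd
        simpa using hc
      have hRlen : (y :: ys).length < n := by
        simp only [List.length_cons] at hL ⊢
        omega
      simp only [htake, hdrop]
      rw [ih _ hLlen x (xs.take (m - 1)) rfl, ih _ hRlen y ys rfl]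
      have hLne := pvCollect_ne_nil x x (xs.take (m - 1))
      obtain ⟨P, a, b, hPq⟩ : ∃ P a b, pvCollect x x (xs.take (m - 1)) = P ++ [(a, b)] := by
        refine ⟨(pvCollect x x (xs.take (m - 1))).dropLast,
          ((pvCollect x x (xs.take (m - 1))).getLast hLne).1,
          ((pvCollect x x (xs.take (m - 1))).getLast hLne).2, ?_⟩
        rw [Prod.mk.eta]
        exact (List.dropLast_concat_getLast hLne).symm
      obtain ⟨d, t', hR, -⟩ := pvFirst ys y y y
      rw [hPq, hR, PySem.List.pyGetD_neg_one_append_singleton, PySem.List.pyGetD_zero_cons,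
        PySem.List.slice_to_neg_one, PySem.List.slice_from_one, List.dropLast_concat,
        List.tail_cons]
      conv_rhs => rw [hsplit]
      rw [pvSplit (xs.take (m - 1)) x x y ys P a b hPq, hR]
      split <;> simp

-- ===== VERDICT (by name: the statement is the Claim_ definition above) =====
theorem format_hours_py_spec : Claim_equal_format_hours_py := by
  intro hours _
  unfold Spec_format_hours_py format_hours_py format_hours_py_alt
  by_cases hnil : hours = []
  · simp [hnil]
  · simp only [if_neg hnil]
    have hs : PySem.List.sorted hours (fun v => v) false ≠ [] := by
      simpa [PySem.List.sorted_eq_nil_iff] using hnil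
    obtain ⟨x, xs, hx⟩ := List.exists_cons_of_ne_nil hs
    rw [hx]
    simp only [PySem.List.pyGetD_zero_cons]
    rw [PySem.List.foldl_pyRange_pyGetD' (x :: xs) 0 pvStep ([], x, x) (a := 1) (by norm_num)]
    simp only [Int.toNat_one, List.drop_succ_cons, List.drop_zero]
    rw [pvFoldA xs [] x x, List.nil_append, pvRanges_eq (x :: xs).length x xs rfl]
    rfl
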